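-- pv_equiv track=rewrite | github.com/madron/s3sync | s3sync/utils.py | get_operations
-- ===== SOURCE A (Python) =====
-- def get_operations(source, destination):
--     source_keys = set(source.keys())
--     destination_keys = set(destination.keys())
--     intersection = source_keys & destination_keys
--     changed = [k for k in intersection if not source[k] == destination[k]]
--     transfer = sorted(list(source_keys - destination_keys) + changed)
--     delete = sorted(list(destination_keys - source_keys))
--     return dict(transfer=transfer, delete=delete)
-- ===== SOURCE B (Python) =====
-- def get_operations(source, destination):
--     skeys = sorted(source)
--     dkeys = sorted(destination)
--     transfer, delete = [], []
--     i = j = 0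
--     while i < len(skeys) and j < len(dkeys):
--         a, b = skeys[i], dkeys[j]
--         if a < b:
--             transfer.append(a)
--             i += 1
--         elif b < a:
--             delete.append(b)
--             j += 1
--         else:
--             if not source[a] == destination[b]:
--                 transfer.append(a)
--             i += 1
--             j += 1
--     transfer += skeys[i:]
--     delete += dkeys[j:]
--     return dict(transfer=transfer, delete=delete)
-- ===== Notes on version B (the rewrite author's own statement) =====
-- stated objective: alternative
-- what changed: Replaced the set-algebra (difference, intersection, changed-filter, then sorting each result) by sorting the two key lists up front and computing transfer and delete in a single two-pointer merge scan that emits both lists already in sorted order.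
import Mathlib
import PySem

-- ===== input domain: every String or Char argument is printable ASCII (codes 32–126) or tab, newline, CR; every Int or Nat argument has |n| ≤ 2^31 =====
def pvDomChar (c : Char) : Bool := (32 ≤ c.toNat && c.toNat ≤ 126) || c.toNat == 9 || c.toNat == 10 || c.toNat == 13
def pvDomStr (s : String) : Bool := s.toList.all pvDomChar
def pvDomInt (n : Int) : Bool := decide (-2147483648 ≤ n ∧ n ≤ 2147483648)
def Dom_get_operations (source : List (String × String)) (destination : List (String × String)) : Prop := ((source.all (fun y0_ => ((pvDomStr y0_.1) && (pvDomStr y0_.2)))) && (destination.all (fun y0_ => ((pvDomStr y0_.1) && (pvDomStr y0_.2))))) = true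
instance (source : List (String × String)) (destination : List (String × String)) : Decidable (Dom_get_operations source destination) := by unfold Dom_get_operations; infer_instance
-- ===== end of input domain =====

-- B replaces A's set algebra (difference/intersection plus changed-filter, each sorted at the
-- end) by sorting the two key lists first and producing transfer and delete in one two-pointer
-- merge scan; same O(n log n) cost, a different algorithm.


-- ===== PORT A =====
-- The set 'intersection' is consumed only through 'sorted' of a nodup list, so Python's hash
-- iteration order cannot be observed.  'not source[k] == destination[k]' is ported as
-- !(get? == get?), exact on the intersection where both lookups are 'some'.
def get_operations (source : List (String × String)) (destination : List (String × String)) : List (String × List String) :=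
  let src := PySem.Dict.mk source
  let dst := PySem.Dict.mk destination
  let source_keys := PySem.Set.ofList (PySem.Dict.keys src)
  let destination_keys := PySem.Set.ofList (PySem.Dict.keys dst)
  let intersection := PySem.Set.inter source_keys destination_keys
  let changed := intersection.filter (fun k => !(PySem.Dict.get? src k == PySem.Dict.get? dst k))
  let transfer := PySem.List.sorted (PySem.Set.diff source_keys destination_keys ++ changed) (fun x => x) false
  let delete := PySem.List.sorted (PySem.Set.diff destination_keys source_keys) (fun x => x) false
  [("transfer", transfer), ("delete", delete)]

-- ===== PORT B =====
-- The while loop with indices i, j is ported as the equivalent recursion consuming the two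
-- sorted key lists; 'transfer.append(a)' / '+= skeys[i:]' become appends to the accumulators.
def goMerge (src dst : PySem.Dict String String) :
    List String → List String → List String → List String → List String × List String
  | a :: xs, b :: ys, t, d =>
    if a < b then goMerge src dst xs (b :: ys) (t ++ [a]) d
    else if b < a then goMerge src dst (a :: xs) ys t (d ++ [b])
    else goMerge src dst xs ys
      (if !(PySem.Dict.get? src a == PySem.Dict.get? dst b) then t ++ [a] else t) d
  | xs, ys, t, d => (t ++ xs, d ++ ys)
  termination_by xs ys _ _ => xs.length + ys.length

def get_operations_alt (source : List (String × String)) (destination : List (String × String)) : List (String × List String) :=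
  let src := PySem.Dict.mk source
  let dst := PySem.Dict.mk destination
  let skeys := PySem.List.sorted (PySem.Dict.keys src) (fun x => x) false
  let dkeys := PySem.List.sorted (PySem.Dict.keys dst) (fun x => x) false
  let td := goMerge src dst skeys dkeys [] []
  [("transfer", td.1), ("delete", td.2)]

-- ===== PRECONDITION & SPEC =====
-- Pre_ admits exactly the association lists with pairwise-distinct keys: only those represent a
-- Python dict (A's parameters are dicts, which can never carry a duplicate key).
def Pre_get_operations (source : List (String × String)) (destination : List (String × String)) : Prop :=
  (source.map Prod.fst).Nodup ∧ (destination.map Prod.fst).Nodup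
instance (source : List (String × String)) (destination : List (String × String)) : Decidable (Pre_get_operations source destination) := by unfold Pre_get_operations; infer_instance
def pvWitness_get_operations : (List (String × String)) × (List (String × String)) :=
  ([("a", "1"), ("b", "2")], [("b", "3"), ("c", "4")])
def Spec_get_operations (source : List (String × String)) (destination : List (String × String)) (out : List (String × List String)) : Prop := out = get_operations_alt source destination
instance (source : List (String × String)) (destination : List (String × String)) (out : List (String × List String)) : Decidable (Spec_get_operations source destination out) := by unfold Spec_get_operations; infer_instance

-- ===== CLAIM (what is proved, stated in full; the proofs are below) =====
def Claim_equal_get_operations : Prop := ∀ (source : List (String × String)) (destination : List (String × String)), Dom_get_operations source destination → Pre_get_operations source destination → Spec_get_operations source destination (get_operations source destination)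

-- ===== LEMMAS AND PROOFS =====

lemma pairwise_lt_of_sorted_nodup (l : List String) (h : l.Nodup) :
    (PySem.List.sorted l (fun x => x) false).Pairwise (· < ·) := by
  have hle := PySem.List.sorted_pairwise (xs := l) (key := fun x => x)
  have hnd : (PySem.List.sorted l (fun x => x) false).Nodup :=
    (PySem.List.sorted_perm l (fun x => x) false).nodup_iff.mpr h
  exact (hle.and hnd).imp (fun h => lt_of_le_of_ne h.1 h.2)

-- the two-pointer merge over strictly increasing lists is a pair of filters
lemma goMerge_eq (src dst : PySem.Dict String String) :
    ∀ (n : Nat) (xs ys t d : List String), xs.length + ys.length ≤ n →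
      xs.Pairwise (· < ·) → ys.Pairwise (· < ·) →
      goMerge src dst xs ys t d =
        (t ++ xs.filter (fun a => !ys.contains a || !(PySem.Dict.get? src a == PySem.Dict.get? dst a)),
         d ++ ys.filter (fun b => !xs.contains b)) := by
  intro n
  induction n with
  | zero =>
    intro xs ys t d hn _ _
    have hx : xs = [] := List.eq_nil_of_length_eq_zero (by omega)
    have hy : ys = [] := List.eq_nil_of_length_eq_zero (by omega)
    subst hx; subst hy; simp [goMerge]
  | succ n ih =>
    intro xs ys t d hn hxs hys
    match xs, ys with
    | [], ys => simp [goMerge]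
    | a :: xs, [] => simp [goMerge]
    | a :: xs, b :: ys =>
      have hxs' := (List.pairwise_cons.mp hxs).2
      have hys' := (List.pairwise_cons.mp hys).2
      have hax := (List.pairwise_cons.mp hxs).1
      have hby := (List.pairwise_cons.mp hys).1
      by_cases hab : a < b
      · rw [goMerge]; rw [if_pos hab]
        rw [ih xs (b :: ys) (t ++ [a]) d (by simp at hn ⊢; omega) hxs' hys]
        have hanotin : (b :: ys).contains a = false := by
          simp only [List.contains_eq_mem, decide_eq_false_iff_not, List.mem_cons]
          rintro (rfl | hmem)
          · exact absurd hab (lt_irrefl _)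
          · exact absurd hab (not_lt_of_gt (hby a hmem))
        simp only [Prod.mk.injEq]
        refine ⟨?_, ?_⟩
        · rw [List.filter_cons_of_pos (by simp only [hanotin, Bool.not_false, Bool.true_or])]
          simp
        · apply congrArg
          apply List.filter_congr
          intro b' hb'
          have hne : b' ≠ a := by
            rcases List.mem_cons.mp hb' with rfl | hmem
            · exact fun e => absurd (e ▸ hab) (lt_irrefl _)
            · exact fun e => absurd (e ▸ lt_trans hab (hby b' hmem)) (lt_irrefl _)
          simp [List.contains_eq_mem, hne]
      · by_cases hba : b < a
        · rw [goMerge]; rw [if_neg hab, if_pos hba]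
          rw [ih (a :: xs) ys t (d ++ [b]) (by simp at hn ⊢; omega) hxs hys']
          have hbnotin : (a :: xs).contains b = false := by
            simp only [List.contains_eq_mem, decide_eq_false_iff_not, List.mem_cons]
            rintro (rfl | hmem)
            · exact absurd hba (lt_irrefl _)
            · exact absurd hba (not_lt_of_gt (hax b hmem))
          simp only [Prod.mk.injEq]
          refine ⟨?_, ?_⟩
          · apply congrArg
            apply List.filter_congr
            intro a' ha'
            have hne : a' ≠ b := by
              rcases List.mem_cons.mp ha' with rfl | hmem
              · exact fun e => absurd (e ▸ hba) (lt_irrefl _)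
              · exact fun e => absurd (e ▸ lt_trans hba (hax a' hmem)) (lt_irrefl _)
            simp [List.contains_eq_mem, hne]
          · rw [List.filter_cons_of_pos (by simp only [hbnotin, Bool.not_false])]
            simp
        · have hba' : a = b := le_antisymm (not_lt.mp hba) (not_lt.mp hab)
          subst hba'
          rw [goMerge]; rw [if_neg hab, if_neg hba]
          rw [ih xs ys _ d (by simp at hn ⊢; omega) hxs' hys']
          simp only [Prod.mk.injEq]
          refine ⟨?_, ?_⟩
          · have hcontains : (a :: ys).contains a = true := by
              simp [List.contains_eq_mem]
            rw [List.filter_cons]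
            simp only [hcontains, Bool.not_true, Bool.false_or]
            have htail : xs.filter (fun a' => !(a :: ys).contains a' || !(PySem.Dict.get? src a' == PySem.Dict.get? dst a'))
                = xs.filter (fun a' => !ys.contains a' || !(PySem.Dict.get? src a' == PySem.Dict.get? dst a')) := by
              apply List.filter_congr
              intro a' ha'
              have hne : a' ≠ a := fun e => absurd (e ▸ hax a' ha') (lt_irrefl _)
              simp [List.contains_eq_mem, hne]
            rw [htail]
            by_cases hchg : (!(PySem.Dict.get? src a == PySem.Dict.get? dst a)) = true
            · simp [hchg, List.append_assoc]
            · simp only [Bool.not_eq_true] at hchg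
              simp [hchg]
          · rw [List.filter_cons]
            have hcontains : (a :: xs).contains a = true := by
              simp [List.contains_eq_mem]
            simp only [hcontains, Bool.not_true, if_neg Bool.false_ne_true]
            apply congrArg
            apply List.filter_congr
            intro b' hb'
            have hne : b' ≠ a := fun e => absurd (e ▸ hby b' hb') (lt_irrefl _)
            simp [List.contains_eq_mem, hne]

-- splitting a filter along a second predicate, up to permutation
lemma filter_perm_split {α : Type} (q P : α → Bool) :
    ∀ (l : List α),
      (l.filter P).Perm
        (l.filter (fun x => !q x && P x) ++ (l.filter q).filter P) := by
  intro l
  induction l with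
  | nil => simp
  | cons x t ih =>
    by_cases hq : q x = true <;> by_cases hP : P x = true
    · rw [List.filter_cons_of_pos hP, List.filter_cons_of_neg (p := fun x => !q x && P x) (by simp [hq]),
        List.filter_cons_of_pos hq, List.filter_cons_of_pos hP]
      exact (ih.cons x).trans List.perm_middle.symm
    · rw [List.filter_cons_of_neg hP, List.filter_cons_of_neg (p := fun x => !q x && P x) (by simp [hP]),
        List.filter_cons_of_pos hq, List.filter_cons_of_neg hP]
      exact ih
    · rw [List.filter_cons_of_pos hP, List.filter_cons_of_pos (p := fun x => !q x && P x) (by simp [hq, hP]),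
        List.filter_cons_of_neg hq]
      exact ih.cons x
    · rw [List.filter_cons_of_neg hP, List.filter_cons_of_neg (p := fun x => !q x && P x) (by simp [hP]),
        List.filter_cons_of_neg hq]
      exact ih

-- ===== VERDICT (by name: the statement is the Claim_ definition above) =====
theorem get_operations_spec : Claim_equal_get_operations := by
  intro source destination _ hpre
  obtain ⟨hs, hd⟩ := hpre
  have hs' : (source.map (fun x => x.1)).Nodup := hs
  have hd' : (destination.map (fun x => x.1)).Nodup := hd
  unfold Spec_get_operations get_operations get_operations_alt
  simp only [PySem.Dict.keys_mk]
  rw [PySem.Set.ofList_eq_self_of_nodup _ hs', PySem.Set.ofList_eq_self_of_nodup _ hd']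
  have hset : ∀ (s t : List String),
      PySem.Set.diff s t = s.filter (fun x => !t.contains x)
        ∧ PySem.Set.inter s t = s.filter (fun x => t.contains x) := by
    intro s t
    constructor <;> simp [PySem.Set.diff, PySem.Set.inter, PySem.Set.contains]
  rw [(hset _ _).1, (hset _ _).2, (hset _ _).1]
  have hsp := pairwise_lt_of_sorted_nodup _ hs'
  have hdp := pairwise_lt_of_sorted_nodup _ hd'
  rw [goMerge_eq (PySem.Dict.mk source) (PySem.Dict.mk destination)
        ((PySem.List.sorted (source.map (fun x => x.1)) (fun x => x) false).length
          + (PySem.List.sorted (destination.map (fun x => x.1)) (fun x => x) false).length)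
        _ _ [] [] le_rfl hsp hdp]
  simp only [List.nil_append]
  have hcont : ∀ (l : List String) (a : String),
      (PySem.List.sorted l (fun x => x) false).contains a = l.contains a := by
    intro l a
    simp only [List.contains_eq_mem]
    exact decide_eq_decide.mpr (PySem.List.sorted_perm l (fun x => x) false).mem_iff
  congr 1
  · -- transfer component
    congr 1
    apply PySem.List.sorted_eq_of_perm_of_pairwise_lt
    · -- permutation
      have hc : (PySem.List.sorted (source.map (fun x => x.1)) (fun x => x) false).filter
            (fun a => !(PySem.List.sorted (destination.map (fun x => x.1)) (fun x => x) false).contains a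
              || !(PySem.Dict.get? (PySem.Dict.mk source) a == PySem.Dict.get? (PySem.Dict.mk destination) a))
          = (PySem.List.sorted (source.map (fun x => x.1)) (fun x => x) false).filter
            (fun a => !(destination.map (fun x => x.1)).contains a
              || !(PySem.Dict.get? (PySem.Dict.mk source) a == PySem.Dict.get? (PySem.Dict.mk destination) a)) := by
        apply List.filter_congr
        intro a _
        rw [hcont]
      rw [hc]
      refine ((PySem.List.sorted_perm _ _ _).filter _).trans ?_
      refine (filter_perm_split (fun x => (destination.map (fun x => x.1)).contains x) _ _).trans ?_
      have h1 : (source.map (fun x => x.1)).filter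
            (fun x => !(destination.map (fun x => x.1)).contains x
              && (!(destination.map (fun x => x.1)).contains x
                || !(PySem.Dict.get? (PySem.Dict.mk source) x == PySem.Dict.get? (PySem.Dict.mk destination) x)))
          = (source.map (fun x => x.1)).filter (fun x => !(destination.map (fun x => x.1)).contains x) := by
        apply List.filter_congr
        intro a _
        cases hq : (destination.map (fun x => x.1)).contains a <;> simp
      have h2 : ((source.map (fun x => x.1)).filter (fun x => (destination.map (fun x => x.1)).contains x)).filter
            (fun a => !(destination.map (fun x => x.1)).contains a
              || !(PySem.Dict.get? (PySem.Dict.mk source) a == PySem.Dict.get? (PySem.Dict.mk destination) a))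
          = ((source.map (fun x => x.1)).filter (fun x => (destination.map (fun x => x.1)).contains x)).filter
            (fun k => !(PySem.Dict.get? (PySem.Dict.mk source) k == PySem.Dict.get? (PySem.Dict.mk destination) k)) := by
        apply List.filter_congr
        intro a ha
        have hq : (destination.map (fun x => x.1)).contains a = true := (List.mem_filter.mp ha).2
        simp only [hq, Bool.not_true, Bool.false_or]
      rw [h1, h2]
    · exact List.Pairwise.filter _ hsp
  · -- delete component
    congr 1
    congr 1
    apply PySem.List.sorted_eq_of_perm_of_pairwise_lt
    · have hc : (PySem.List.sorted (destination.map (fun x => x.1)) (fun x => x) false).filter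
            (fun b => !(PySem.List.sorted (source.map (fun x => x.1)) (fun x => x) false).contains b)
          = (PySem.List.sorted (destination.map (fun x => x.1)) (fun x => x) false).filter
            (fun b => !(source.map (fun x => x.1)).contains b) := by
        apply List.filter_congr
        intro a _
        rw [hcont]
      rw [hc]
      exact (PySem.List.sorted_perm _ _ _).filter _
    · exact List.Pairwise.filter _ hdp
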